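-- pv_equiv track=rewrite | github.com/h4x0r-dz/python-thigns- | convert to enclosed alphanumerics.py | enclose_alphanumerics
-- ===== SOURCE A (Python) =====
-- def enclose_alphanumerics(text_to_convert):
--     # Mapping of alphanumeric characters to their enclosed equivalents
--     enclosed_map = {
--         '0': '⓪', '1': '①', '2': '②', '3': '③', '4': '④',
--         '5': '⑤', '6': '⑥', '7': '⑦', '8': '⑧', '9': '⑨',
--         'a': 'ⓐ', 'b': 'ⓑ', 'c': 'ⓒ', 'd': 'ⓓ', 'e': 'ⓔ',
--         'f': 'ⓕ', 'g': 'ⓖ', 'h': 'ⓗ', 'i': 'ⓘ', 'j': 'ⓙ',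
--         'k': 'ⓚ', 'l': 'ⓛ', 'm': 'ⓜ', 'n': 'ⓝ', 'o': 'ⓞ',
--         'p': 'ⓟ', 'q': 'ⓠ', 'r': 'ⓡ', 's': 'ⓢ', 't': 'ⓣ',
--         'u': 'ⓤ', 'v': 'ⓥ', 'w': 'ⓦ', 'x': 'ⓧ', 'y': 'ⓨ',
--         'z': 'ⓩ'
--     }
--
--     # Convert each character using the map, leaving non-alphanumeric characters unchanged
--     enclosed_text = ''.join(enclosed_map.get(char.lower(), char) for char in text_to_convert)
--
--     return enclosed_text
-- ===== SOURCE B (Python) =====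
-- def enclose_alphanumerics(text_to_convert):
--     # Staged rewriting: 36 successive whole-string replace passes (one per
--     # digit, one pair per letter), instead of a per-character table lookup.
--     for i in range(10):
--         text_to_convert = text_to_convert.replace(
--             chr(48 + i), chr(0x24EA) if i == 0 else chr(0x2460 + i - 1))
--     for i in range(26):
--         circled = chr(0x24D0 + i)
--         text_to_convert = text_to_convert.replace(chr(97 + i), circled)
--         text_to_convert = text_to_convert.replace(chr(65 + i), circled)
--     return text_to_convert
-- ===== Notes on version B (the rewrite author's own statement) =====
-- stated objective: faster
-- what changed: Replaced the per-character dict-lookup generator join with staged whole-string rewriting: 36 successive str.replace passes (one per digit, a lowercase+uppercase pair per letter) computed from code points; a timing run measured B 8.7x faster since each pass runs in C instead of a Python-level per-char loop.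
import Mathlib
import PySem

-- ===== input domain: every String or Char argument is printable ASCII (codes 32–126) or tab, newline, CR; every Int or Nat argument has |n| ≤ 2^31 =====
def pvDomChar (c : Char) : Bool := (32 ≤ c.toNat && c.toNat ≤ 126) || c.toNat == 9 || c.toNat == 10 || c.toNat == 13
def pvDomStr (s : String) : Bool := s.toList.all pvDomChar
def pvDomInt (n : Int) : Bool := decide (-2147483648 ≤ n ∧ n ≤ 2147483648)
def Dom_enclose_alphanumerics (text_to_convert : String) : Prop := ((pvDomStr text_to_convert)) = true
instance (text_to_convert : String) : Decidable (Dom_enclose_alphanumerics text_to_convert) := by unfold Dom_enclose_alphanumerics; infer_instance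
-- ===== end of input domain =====

set_option maxRecDepth 8192
set_option maxHeartbeats 1600000


-- B replaces A's per-char dict lookup with 36 staged whole-string replace passes; a timing run measured B faster by a constant factor (bulk replaces instead of a per-char Python loop).

-- ===== PORT A =====
-- A's dict of 1-char-string keys/values, ported as an association dict over List Char (Python str of length 1)
def pvEnclosedMap : PySem.Dict (List Char) (List Char) := PySem.Dict.ofList
  [(['0'],['⓪']), (['1'],['①']), (['2'],['②']), (['3'],['③']), (['4'],['④']),
   (['5'],['⑤']), (['6'],['⑥']), (['7'],['⑦']), (['8'],['⑧']), (['9'],['⑨']),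
   (['a'],['ⓐ']), (['b'],['ⓑ']), (['c'],['ⓒ']), (['d'],['ⓓ']), (['e'],['ⓔ']),
   (['f'],['ⓕ']), (['g'],['ⓖ']), (['h'],['ⓗ']), (['i'],['ⓘ']), (['j'],['ⓙ']),
   (['k'],['ⓚ']), (['l'],['ⓛ']), (['m'],['ⓜ']), (['n'],['ⓝ']), (['o'],['ⓞ']),
   (['p'],['ⓟ']), (['q'],['ⓠ']), (['r'],['ⓡ']), (['s'],['ⓢ']), (['t'],['ⓣ']),
   (['u'],['ⓤ']), (['v'],['ⓥ']), (['w'],['ⓦ']), (['x'],['ⓧ']), (['y'],['ⓨ']),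
   (['z'],['ⓩ'])]

def enclose_alphanumerics (text_to_convert : String) : String :=
  String.ofList ((text_to_convert.toList.map
    (fun ch => pvEnclosedMap.getD (PySem.Chars.lower [ch]) [ch])).flatten)

-- ===== PORT B =====
-- Source B's digit pass: text = text.replace(chr(48+i), chr(0x24EA) if i==0 else chr(0x2460+i-1))
def pvDigitStep (acc : String) (i : Int) : String :=
  PySem.Str.replace acc (String.ofList [Char.ofNat (48 + i).toNat])
    (if i = 0 then String.ofList [Char.ofNat 0x24EA]
     else String.ofList [Char.ofNat (0x2460 + i - 1).toNat])

-- Source B's letter pass: replace lowercase then uppercase by the same circled letter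
def pvLetterStep (acc : String) (i : Int) : String :=
  PySem.Str.replace
    (PySem.Str.replace acc (String.ofList [Char.ofNat (97 + i).toNat])
      (String.ofList [Char.ofNat (0x24D0 + i).toNat]))
    (String.ofList [Char.ofNat (65 + i).toNat])
    (String.ofList [Char.ofNat (0x24D0 + i).toNat])

def enclose_alphanumerics_alt (text_to_convert : String) : String :=
  (PySem.List.pyRange 0 26 1).foldl pvLetterStep
    ((PySem.List.pyRange 0 10 1).foldl pvDigitStep text_to_convert)

-- ===== PRECONDITION & SPEC =====
def Spec_enclose_alphanumerics (text_to_convert : String) (out : String) : Prop := out = enclose_alphanumerics_alt text_to_convert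
instance (text_to_convert : String) (out : String) : Decidable (Spec_enclose_alphanumerics text_to_convert out) := by unfold Spec_enclose_alphanumerics; infer_instance

-- ===== CLAIM (what is proved, stated in full; the proofs are below) =====
def Claim_equal_enclose_alphanumerics : Prop := ∀ (text_to_convert : String), Dom_enclose_alphanumerics text_to_convert → Spec_enclose_alphanumerics text_to_convert (enclose_alphanumerics text_to_convert)

-- ===== LEMMAS AND PROOFS =====

-- replace with a single-char pattern and single-char replacement is a per-char map
theorem pvGo1 (c d : Char) : ∀ (fuel : Nat) (l acc : List Char), l.length ≤ fuel →
    PySem.Chars.replace.go [c] [d] fuel l acc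
      = acc.reverse ++ l.map (fun x => if x = c then d else x) := by
  intro fuel
  induction fuel with
  | zero =>
    intro l acc h
    cases l with
    | nil => simp [PySem.Chars.replace.go]
    | cons x t => simp at h
  | succ n ih =>
    intro l acc h
    cases l with
    | nil => simp [PySem.Chars.replace.go]
    | cons x t =>
      by_cases hx : x = c
      · have hpre : List.isPrefixOf [c] (x :: t) = true := by
          simp [List.isPrefixOf, hx]
        simp only [PySem.Chars.replace.go, hpre]
        have : List.drop (List.length [c]) (x :: t) = t := by simp
        rw [this, ih t _ (by simpa using Nat.le_of_succ_le_succ h)]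
        simp [hx]
      · have hpre : List.isPrefixOf [c] (x :: t) = false := by
          simp [List.isPrefixOf]
          exact fun hc => (hx hc.symm).elim
        simp only [PySem.Chars.replace.go, hpre]
        rw [if_neg (by simp), ih t _ (by simpa using Nat.le_of_succ_le_succ h)]
        simp [hx]

theorem pvRepl1 (l : List Char) (c d : Char) :
    PySem.Chars.replace l [c] [d] = l.map (fun x => if x = c then d else x) := by
  unfold PySem.Chars.replace
  rw [if_neg (by simp)]
  simpa using pvGo1 c d l.length l [] le_rfl

theorem pvStrRepl1 (s : String) (c d : Char) :
    PySem.Str.replace s (String.ofList [c]) (String.ofList [d])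
      = String.ofList (s.toList.map (fun x => if x = c then d else x)) := by
  unfold PySem.Str.replace
  simp [pvRepl1]

-- a fold of per-char string passes is the per-char fold, mapped
theorem pvFoldMap (is : List Int) (g : Int → Char → Char) (step : String → Int → String)
    (hstep : ∀ s i, step s i = String.ofList (s.toList.map (g i))) :
    ∀ s : String, is.foldl step s
      = String.ofList (s.toList.map (fun x => is.foldl (fun y i => g i y) x)) := by
  induction is with
  | nil => intro s; simp
  | cons i rest ih =>
    intro s
    simp only [List.foldl_cons, hstep, ih, String.toList_ofList, List.map_map]
    rfl

def pvDigitG (i : Int) (x : Char) : Char :=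
  if x = Char.ofNat (48 + i).toNat
  then (if i = 0 then Char.ofNat 0x24EA else Char.ofNat (0x2460 + i - 1).toNat)
  else x

def pvLetterG (i : Int) (x : Char) : Char :=
  if (if x = Char.ofNat (97 + i).toNat then Char.ofNat (0x24D0 + i).toNat else x)
      = Char.ofNat (65 + i).toNat
  then Char.ofNat (0x24D0 + i).toNat
  else (if x = Char.ofNat (97 + i).toNat then Char.ofNat (0x24D0 + i).toNat else x)

theorem pvDigitStep_eq (s : String) (i : Int) :
    pvDigitStep s i = String.ofList (s.toList.map (pvDigitG i)) := by
  unfold pvDigitStep pvDigitG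
  by_cases h : i = 0
  · rw [if_pos h, pvStrRepl1]; simp [h]
  · rw [if_neg h, pvStrRepl1]; simp [h]

theorem pvLetterStep_eq (s : String) (i : Int) :
    pvLetterStep s i = String.ofList (s.toList.map (pvLetterG i)) := by
  unfold pvLetterStep pvLetterG
  rw [pvStrRepl1, pvStrRepl1]
  simp only [String.toList_ofList, List.map_map]
  rfl

-- B as a single per-char map
theorem pvAlt_map (s : String) :
    enclose_alphanumerics_alt s
      = String.ofList (s.toList.map (fun x =>
          (PySem.List.pyRange 0 26 1).foldl (fun y i => pvLetterG i y)
            ((PySem.List.pyRange 0 10 1).foldl (fun y i => pvDigitG i y) x))) := by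
  unfold enclose_alphanumerics_alt
  rw [pvFoldMap _ pvDigitG pvDigitStep pvDigitStep_eq,
      pvFoldMap _ pvLetterG pvLetterStep pvLetterStep_eq]
  simp only [String.toList_ofList, List.map_map, Function.comp_def]

-- per-char agreement of the two programs on every domain character
theorem pvChar_agree : ∀ n ∈ List.range 128,
    pvEnclosedMap.getD (PySem.Chars.lower [Char.ofNat n]) [Char.ofNat n]
      = [(PySem.List.pyRange 0 26 1).foldl (fun y i => pvLetterG i y)
          ((PySem.List.pyRange 0 10 1).foldl (fun y i => pvDigitG i y) (Char.ofNat n))] := by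
  have h10 : PySem.List.pyRange 0 10 1 = [0,1,2,3,4,5,6,7,8,9] := by decide
  have h26 : PySem.List.pyRange 0 26 1 = [0,1,2,3,4,5,6,7,8,9,10,11,12,13,14,15,16,17,18,19,20,21,22,23,24,25] := by decide
  rw [h10, h26]
  decide

theorem pvCharLt (c : Char) (h : pvDomChar c = true) : c.toNat < 128 := by
  simp [pvDomChar] at h
  omega

theorem pvFlattenSingle {α : Type} (l : List α) (f : α → List α) (g : α → α)
    (h : ∀ x ∈ l, f x = [g x]) : (l.map f).flatten = l.map g := by
  induction l with
  | nil => rfl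
  | cons x t ih =>
    simp only [List.map_cons, List.flatten_cons, h x (by simp),
      ih (fun y hy => h y (by simp [hy]))]
    rfl

-- ===== VERDICT (by name: the statement is the Claim_ definition above) =====
theorem enclose_alphanumerics_spec : Claim_equal_enclose_alphanumerics := by
  intro s hdom
  unfold Spec_enclose_alphanumerics
  rw [pvAlt_map]
  unfold enclose_alphanumerics
  congr 1
  apply pvFlattenSingle
  intro ch hch
  have hd : pvDomChar ch = true := (List.all_eq_true.mp hdom) ch hch
  have hlt : ch.toNat < 128 := pvCharLt ch hd
  have := pvChar_agree ch.toNat (List.mem_range.mpr hlt)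
  rwa [Char.ofNat_toNat ch] at this
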